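-- pv_equiv track=rewrite | github.com/critterpsy/Frankenmusic | src/species/search.py | _count_valid_paths
-- ===== SOURCE A (Python) =====
-- from collections import defaultdict
--
-- def _count_valid_paths(
--     viable_states: list[set[int]],
--     edges: list[list[list[int]]],
-- ) -> int:
--     n = len(viable_states)
--     counts: list[dict[int, int]] = [defaultdict(int) for _ in range(n)]
--     for start_idx in viable_states[0]:
--         counts[0][start_idx] = 1
--
--     for i in range(n - 1):
--         for left_idx, left_count in counts[i].items():
--             if left_count == 0:
--                 continue
--             for right_idx in edges[i][left_idx]:
--                 counts[i + 1][right_idx] += left_count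
--
--     return sum(counts[-1].values())
-- ===== SOURCE B (Python) =====
-- def _count_valid_paths(
--     viable_states: list[set[int]],
--     edges: list[list[list[int]]],
-- ) -> int:
--     # Backward "pull" DP: ways[i][node] = number of paths from node (layer i) to the
--     # last layer; the answer is the sum of ways[0] over the start set.
--     n = len(viable_states)
--     if n == 1:
--         return len(viable_states[0])
--     nxt = None  # None stands for the last layer, where every node has 1 way
--     for i in range(n - 2, -1, -1):
--         if nxt is None:
--             cur = [len(targets) for targets in edges[i]]
--         else:
--             cur = [sum(nxt[r] for r in targets) for targets in edges[i]]
--         nxt = cur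
--     return sum(nxt[s] for s in viable_states[0])
-- ===== Notes on version B (the rewrite author's own statement) =====
-- stated objective: alternative
-- what changed: Replaced the forward push DP over per-layer defaultdicts (propagating counts from the start set layer by layer) by a backward pull DP over plain lists: ways-to-end per node are computed from the last layer down and the answer is the sum of ways[0] over the start set.
-- outside the precondition, e.g. on _count_valid_paths([set(), set()], []): A returns 0, B raises IndexError; on _count_valid_paths([{0}, set(), set()], [[[], [7]], [[0]]]): A returns 0, B raises IndexError
import Mathlib
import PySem

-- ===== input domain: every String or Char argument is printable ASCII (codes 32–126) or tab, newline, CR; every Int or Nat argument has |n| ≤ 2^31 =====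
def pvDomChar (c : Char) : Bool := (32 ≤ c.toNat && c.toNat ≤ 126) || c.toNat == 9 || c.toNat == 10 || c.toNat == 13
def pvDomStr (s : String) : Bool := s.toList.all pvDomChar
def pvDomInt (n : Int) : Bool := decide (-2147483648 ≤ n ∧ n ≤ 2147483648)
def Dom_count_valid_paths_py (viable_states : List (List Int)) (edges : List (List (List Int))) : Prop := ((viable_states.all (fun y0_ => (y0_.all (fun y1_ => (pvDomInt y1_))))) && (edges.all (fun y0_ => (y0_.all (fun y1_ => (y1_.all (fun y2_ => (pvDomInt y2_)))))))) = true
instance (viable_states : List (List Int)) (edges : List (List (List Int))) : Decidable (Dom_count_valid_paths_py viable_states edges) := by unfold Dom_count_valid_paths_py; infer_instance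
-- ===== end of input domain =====

-- B replaces A's forward push DP over per-layer defaultdicts by a backward pull DP over
-- plain lists (objective: alternative decomposition, same cost).

-- ===== PORT A =====
-- inner loop 'for right_idx in edges[i][left_idx]: counts[i+1][right_idx] += left_count'
def pvAddRow (c : Int) (row : List Int) (d : PySem.Dict Int Int) : PySem.Dict Int Int :=
  row.foldl (fun d r => d.insert r (d.getD r 0 + c)) d
def pvStep (erow : List (List Int)) (cur : PySem.Dict Int Int) : PySem.Dict Int Int :=
  cur.items.foldl
    (fun nxt kc => if kc.2 == 0 then nxt else pvAddRow kc.2 ((PySem.List.pyGet? erow kc.1).getD []) nxt)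
    PySem.Dict.empty
def count_valid_paths_py (viable_states : List (List Int)) (edges : List (List (List Int))) : Int :=
  let n := viable_states.length
  let counts0 : List (PySem.Dict Int Int) := List.replicate n PySem.Dict.empty
  let c0 := ((PySem.List.pyGet? viable_states 0).getD []).foldl
      (fun d s => d.insert s 1) PySem.Dict.empty
  let counts1 := PySem.List.pySetD counts0 0 c0
  let countsF := (PySem.List.pyRange 0 ((n : Int) - 1) 1).foldl
      (fun cs i =>
        PySem.List.pySetD cs (i + 1)
          (pvStep ((PySem.List.pyGet? edges i).getD [])
                  ((PySem.List.pyGet? cs i).getD PySem.Dict.empty)))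
      counts1
  (((PySem.List.pyGet? countsF (-1)).getD PySem.Dict.empty).values).foldl (· + ·) 0

-- ===== PORT B =====
def pvRowWays (nxt : Option (List Int)) (targets : List Int) : Int :=
  match nxt with
  | none => (targets.length : Int)
  | some w => (targets.map (fun r => (PySem.List.pyGet? w r).getD 0)).sum

def count_valid_paths_py_alt (viable_states : List (List Int)) (edges : List (List (List Int))) : Int :=
  let n := viable_states.length
  if n = 1 then (((PySem.List.pyGet? viable_states 0).getD []).length : Int)
  else
    let nxt := (PySem.List.pyRange ((n : Int) - 2) (-1) (-1)).foldl
      (fun st i => some (((PySem.List.pyGet? edges i).getD []).map (pvRowWays st)))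
      (none : Option (List Int))
    (((PySem.List.pyGet? viable_states 0).getD []).map
      (fun s => (PySem.List.pyGet? (nxt.getD []) s).getD 0)).sum

-- ===== PRECONDITION & SPEC =====
-- Pre_ admits inputs on which the Python A surely returns AND on which B returns too:
-- viable_states nonempty (else A raises IndexError); viable_states[0] duplicate-free
-- (it is a Python set, so the List holds its distinct elements); every edge row
-- edges[i], i < n-1, exists, and every node index that can be fed into layer i (the
-- start set for i = 0, anything listed in edges[i-1] for i > 0) is a valid Python index
-- into edges[i].  This over-approximates A's reachable indices: on inputs whose DP dies
-- out before an out-of-range entry of an UNREACHED node (or before a missing edge row),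
-- A returns 0 while B — which evaluates every row of every layer — raises IndexError;
-- exactly those inputs are excluded (see the cites in the claim).
def Pre_count_valid_paths_py (viable_states : List (List Int)) (edges : List (List (List Int))) : Prop :=
  viable_states ≠ [] ∧
  (viable_states.headD []).Nodup ∧
  viable_states.length - 1 ≤ edges.length ∧
  ∀ i ∈ List.range (viable_states.length - 1),
    ∀ s ∈ (if i = 0 then viable_states.headD []
           else ((PySem.List.pyGet? edges ((i : Int) - 1)).getD []).flatten),
      PySem.Raise.InRange ((PySem.List.pyGet? edges (i : Int)).getD []).length s

instance (viable_states : List (List Int)) (edges : List (List (List Int))) : Decidable (Pre_count_valid_paths_py viable_states edges) := by unfold Pre_count_valid_paths_py; infer_instance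

def pvWitness_count_valid_paths_py : List (List Int) × List (List (List Int)) :=
  ([[0], [0]], [[[0]]])

def Spec_count_valid_paths_py (viable_states : List (List Int)) (edges : List (List (List Int))) (out : Int) : Prop := out = count_valid_paths_py_alt viable_states edges
instance (viable_states : List (List Int)) (edges : List (List (List Int))) (out : Int) : Decidable (Spec_count_valid_paths_py viable_states edges out) := by unfold Spec_count_valid_paths_py; infer_instance

-- ===== CLAIM (what is proved, stated in full; the proofs are below) =====
def Claim_equal_count_valid_paths_py : Prop := ∀ (viable_states : List (List Int)) (edges : List (List (List Int))), Dom_count_valid_paths_py viable_states edges → Pre_count_valid_paths_py viable_states edges → Spec_count_valid_paths_py viable_states edges (count_valid_paths_py viable_states edges)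

-- ===== LEMMAS AND PROOFS =====

def waysOf : List (List (List Int)) → Int → Int
  | [], _ => 1
  | r :: rs, k => (((PySem.List.pyGet? r k).getD []).map (fun t => waysOf rs t)).sum
def phi (f : Int → Int) (d : PySem.Dict Int Int) : Int :=
  (d.items.map (fun kc => kc.2 * f kc.1)).sum

-- list core of the insert-overwrite case
theorem phi_list_update (f : Int → Int) (r v w : Int) :
    ∀ (l : List (Int × Int)), (l.map (·.1)).Nodup → (r, w) ∈ l →
    ((l.map (fun p => if (p.1 == r) = true then (r, v) else p)).map (fun p => p.2 * f p.1)).sum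
      = (l.map (fun p => p.2 * f p.1)).sum + v * f r - w * f r := by
  intro l
  induction l with
  | nil => simp
  | cons p t ih =>
    intro hnd hm
    simp only [List.map_cons, List.nodup_cons, List.mem_map] at hnd
    rcases List.mem_cons.1 hm with h | h
    · subst h
      simp only [List.map_cons, List.sum_cons, beq_self_eq_true, if_pos]
      have ht : (t.map (fun p => if (p.1 == r) = true then (r, v) else p)) = t := by
        rw [show t = t.map id by simp]
        rw [List.map_map]
        apply List.map_congr_left
        intro q hq
        have hq1 : q.1 ≠ r := fun he => hnd.1 ⟨q, by simpa using hq, by simpa using he⟩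
        simp [hq1]
      rw [ht]; ring
    · have hpr : p.1 ≠ r := by
        intro he
        exact hnd.1 ⟨(r, w), h, by simp [he]⟩
      simp only [List.map_cons, List.sum_cons]
      rw [if_neg (by simpa using hpr), ih hnd.2 h]; ring

theorem phi_insert_add (f : Int → Int) (d : PySem.Dict Int Int) (r c : Int)
    (hnd : d.keys.Nodup) :
    phi f (d.insert r (d.getD r 0 + c)) = phi f d + c * f r := by
  by_cases h : d.contains r = true
  · -- key present: value w = d.getD r 0, entry replaced in place
    have hw : d.get? r = some (d.getD r 0) := by
      rcases Option.isSome_iff_exists.1 (by rw [← PySem.Dict.contains_eq_isSome_get? (d := d)]; exact h) with ⟨w, hw⟩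
      rw [hw, PySem.Dict.getD_of_get?_eq_some _ _ hw]
    have hmem : (r, d.getD r 0) ∈ d.items := PySem.Dict.mem_items_of_get?_eq_some _ hw
    unfold phi
    rw [PySem.Dict.items_insert_of_contains _ _ h,
        phi_list_update f r (d.getD r 0 + c) (d.getD r 0) d.items hnd hmem]
    ring
  · have h' : d.contains r = false := by simpa using h
    unfold phi
    rw [PySem.Dict.items_insert_of_not_contains _ _ h',
        PySem.Dict.getD_of_not_contains _ _ h']
    simp [List.sum_append]

theorem nodup_keys_addRow (c : Int) (row : List Int) (d : PySem.Dict Int Int)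
    (h : d.keys.Nodup) : (pvAddRow c row d).keys.Nodup :=
  PySem.Dict.nodup_keys_foldl_insert row (fun d r => d.getD r 0 + c) d h

theorem phi_addRow (f : Int → Int) (c : Int) :
    ∀ (row : List Int) (d : PySem.Dict Int Int), d.keys.Nodup →
      phi f (pvAddRow c row d) = phi f d + c * (row.map f).sum := by
  intro row
  induction row with
  | nil => intro d _; simp [pvAddRow, phi]
  | cons r t ih =>
    intro d hnd
    have : pvAddRow c (r :: t) d = pvAddRow c t (d.insert r (d.getD r 0 + c)) := rfl
    rw [this, ih _ (PySem.Dict.nodup_keys_insert d r _ hnd), phi_insert_add f d r c hnd]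
    simp; ring

theorem nodup_keys_step (erow : List (List Int)) (cur : PySem.Dict Int Int) :
    (pvStep erow cur).keys.Nodup := by
  unfold pvStep
  generalize cur.items = l
  have : ∀ (l : List (Int × Int)) (e : PySem.Dict Int Int), e.keys.Nodup →
      (l.foldl (fun nxt kc => if kc.2 == 0 then nxt
        else pvAddRow kc.2 ((PySem.List.pyGet? erow kc.1).getD []) nxt) e).keys.Nodup := by
    intro l
    induction l with
    | nil => intro e he; simpa
    | cons p t ih =>
      intro e he
      simp only [List.foldl_cons]
      by_cases hp : (p.2 == 0) = true
      · rw [if_pos hp]; exact ih e he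
      · rw [if_neg hp]; exact ih _ (nodup_keys_addRow _ _ _ he)
  exact this l PySem.Dict.empty (by simp)

theorem phi_step (f : Int → Int) (erow : List (List Int)) (cur : PySem.Dict Int Int) :
    phi f (pvStep erow cur)
      = (cur.items.map (fun kc => kc.2 * ((((PySem.List.pyGet? erow kc.1).getD []).map f).sum))).sum := by
  unfold pvStep
  generalize cur.items = l
  have main : ∀ (l : List (Int × Int)) (e : PySem.Dict Int Int), e.keys.Nodup →
      phi f (l.foldl (fun nxt kc => if kc.2 == 0 then nxt
        else pvAddRow kc.2 ((PySem.List.pyGet? erow kc.1).getD []) nxt) e)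
      = phi f e + (l.map (fun kc => kc.2 * ((((PySem.List.pyGet? erow kc.1).getD []).map f).sum))).sum := by
    intro l
    induction l with
    | nil => intro e he; simp
    | cons p t ih =>
      intro e he
      simp only [List.foldl_cons, List.map_cons, List.sum_cons]
      by_cases hp : (p.2 == 0) = true
      · rw [if_pos hp, ih e he]
        have : p.2 = 0 := by simpa using hp
        rw [this]; ring
      · rw [if_neg hp, ih _ (nodup_keys_addRow _ _ _ he), phi_addRow f _ _ _ he]
        ring
  rw [main l PySem.Dict.empty (by simp)]
  simp [phi, PySem.Dict.empty]

-- A's chain of pvSteps, characterized by waysOf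
theorem aChar : ∀ (rs : List (List (List Int))) (d : PySem.Dict Int Int), d.keys.Nodup →
    ((rs.foldl (fun c r => pvStep r c) d).items.map (·.2)).sum = phi (waysOf rs) d := by
  intro rs
  induction rs with
  | nil =>
    intro d _
    unfold phi waysOf
    simp
  | cons r rs ih =>
    intro d hnd
    simp only [List.foldl_cons]
    rw [ih (pvStep r d) (nodup_keys_step r d), phi_step]
    rfl

def wlRec : List (List (List Int)) → Option (List Int)
  | [] => none
  | r :: rs => some (r.map (fun targets =>
      match wlRec rs with
      | none => (targets.length : Int)
      | some w => (targets.map (fun t => (PySem.List.pyGet? w t).getD 0)).sum))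

def pvLookup (st : Option (List Int)) (t : Int) : Int :=
  match st with
  | none => 1
  | some w => (PySem.List.pyGet? w t).getD 0

theorem pyGet?_map_row (r : List (List Int)) (k : Int) (g : List Int → Int) :
    PySem.List.pyGet? (r.map g) k = (PySem.List.pyGet? r k).map g := by
  simp [PySem.List.pyGet?, PySem.List.pyIdx?]

theorem lookup_wlRec : ∀ (rs : List (List (List Int))) (t : Int),
    pvLookup (wlRec rs) t = waysOf rs t := by
  intro rs
  induction rs with
  | nil => intro t; rfl
  | cons r rs ih =>
    intro t
    show (PySem.List.pyGet? (r.map _) t).getD 0 = _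
    rw [pyGet?_map_row]
    cases h : PySem.List.pyGet? r t with
    | none => simp [waysOf, h]
    | some row =>
      simp only [Option.map_some, Option.getD_some, waysOf, h]
      cases hrs : wlRec rs with
      | none =>
        cases rs with
        | nil =>
          show ((row.length : Int)) = _
          simp [waysOf]
        | cons a b => simp [wlRec] at hrs
      | some w =>
        show (row.map (fun t => (PySem.List.pyGet? w t).getD 0)).sum = _
        congr 1
        apply List.map_congr_left
        intro u _
        have := ih u
        rw [hrs] at this
        exact this

-- B's backward fold, written as a foldr over the ascending index list
theorem bFold_eq_wlRec (edges : List (List (List Int))) :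
    ∀ (l : List Int),
      l.foldr (fun i st => some (((PySem.List.pyGet? edges i).getD []).map (pvRowWays st))) none
        = wlRec (l.map (fun i => (PySem.List.pyGet? edges i).getD [])) := by
  intro l
  induction l with
  | nil => rfl
  | cons i t ih =>
    simp only [List.foldr_cons, List.map_cons, wlRec, ih]
    rfl

def pvRows (edges : List (List (List Int))) (m : Nat) : List (List (List Int)) :=
  (List.range m).map (fun (j : Nat) => (PySem.List.pyGet? edges (j : Int)).getD [])

theorem pvRows_succ (edges : List (List (List Int))) (m : Nat) :
    pvRows edges (m + 1) = pvRows edges m ++ [(PySem.List.pyGet? edges (m : Int)).getD []] := by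
  simp [pvRows, List.range_succ]

theorem rollInv (edges : List (List (List Int))) (n : Nat) (c0 : PySem.Dict Int Int)
    (hn : 0 < n) : ∀ m : Nat, m ≤ n - 1 →
    ((PySem.List.pyRange 0 (m : Int) 1).foldl
        (fun cs i => PySem.List.pySetD cs (i + 1)
          (pvStep ((PySem.List.pyGet? edges i).getD [])
                  ((PySem.List.pyGet? cs i).getD PySem.Dict.empty)))
        (PySem.List.pySetD (List.replicate n PySem.Dict.empty) 0 c0)).length = n ∧
    ((PySem.List.pyRange 0 (m : Int) 1).foldl
        (fun cs i => PySem.List.pySetD cs (i + 1)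
          (pvStep ((PySem.List.pyGet? edges i).getD [])
                  ((PySem.List.pyGet? cs i).getD PySem.Dict.empty)))
        (PySem.List.pySetD (List.replicate n PySem.Dict.empty) 0 c0))[m]?
      = some ((pvRows edges m).foldl (fun c r => pvStep r c) c0) := by
  intro m
  induction m with
  | zero =>
    intro _
    have h0 : PySem.List.pySetD (List.replicate n PySem.Dict.empty) 0 c0
        = (List.replicate n PySem.Dict.empty).set 0 c0 := by
      simpa using PySem.List.pySetD_natCast (List.replicate n PySem.Dict.empty) (n := 0) c0
    rw [show ((0 : Nat) : Int) = 0 from rfl, PySem.List.pyRange_one_eq_nil (by omega)]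
    simp only [List.foldl_nil, h0]
    refine ⟨by simp, ?_⟩
    rw [List.getElem?_set_self (by simpa using hn)]
    rfl
  | succ m ih =>
    intro hm
    have hm' : m ≤ n - 1 := by omega
    obtain ⟨ihlen, ihget⟩ := ih hm'
    have hcast : ((m + 1 : Nat) : Int) = (m : Int) + 1 := by push_cast; ring
    rw [hcast, PySem.List.pyRange_one_succ_right (by positivity), List.foldl_append]
    simp only [List.foldl_cons, List.foldl_nil]
    simp only [PySem.List.pyGet?_natCast]
    rw [ihget]
    simp only [Option.getD_some]
    rw [show ((m : Int) + 1) = ((m + 1 : Nat) : Int) from by push_cast; ring,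
        PySem.List.pySetD_natCast]
    have hlt : m + 1 < n := by omega
    refine ⟨by simpa using ihlen, ?_⟩
    rw [List.getElem?_set_self (by omega)]
    congr 1
    rw [pvRows_succ, List.foldl_append]
    simp only [List.foldl_cons, List.foldl_nil, PySem.List.pyGet?_natCast]

theorem A_eq (viable_states : List (List Int)) (edges : List (List (List Int)))
    (hvs : viable_states ≠ []) (hnd : (viable_states.headD []).Nodup) :
    count_valid_paths_py viable_states edges
      = (((PySem.List.pyGet? viable_states 0).getD []).map
          (fun s => waysOf (pvRows edges (viable_states.length - 1)) s)).sum := by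
  have hn : 0 < viable_states.length := List.length_pos_iff.2 hvs
  have hstarts : (PySem.List.pyGet? viable_states 0).getD [] = viable_states.headD [] := by
    cases viable_states with
    | nil => simp at hvs
    | cons a t => simp
  set starts := (PySem.List.pyGet? viable_states 0).getD [] with hs
  set c0 : PySem.Dict Int Int := starts.foldl (fun d s => d.insert s 1) PySem.Dict.empty with hc0
  have hc0nd : c0.keys.Nodup :=
    PySem.Dict.nodup_keys_foldl_insert starts (fun _ _ => 1) PySem.Dict.empty
      (by simp)
  have hc0items : c0.items = starts.map (fun s => (s, (1 : Int))) := by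
    have := PySem.Dict.items_foldl_insert_fresh starts (fun s => s) (fun _ => (1 : Int))
      PySem.Dict.empty (by intro a _; simp) (by simpa [hstarts] using hnd)
    simpa using this
  obtain ⟨hlen, hget⟩ := rollInv edges viable_states.length c0 hn (viable_states.length - 1) le_rfl
  unfold count_valid_paths_py
  simp only [← hs, ← hc0]
  rw [show ((viable_states.length : Int) - 1) = ((viable_states.length - 1 : Nat) : Int) from by omega]
  rw [PySem.List.pyGet?_neg_one, List.getLast?_eq_getElem?, hlen,
      show viable_states.length - 1 = viable_states.length - 1 from rfl, hget]
  simp only [Option.getD_some]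
  have hsum : ∀ l : List Int, l.foldl (· + ·) 0 = l.sum := by
    intro l; simpa using PySem.List.foldl_add l (fun x => x) 0
  have hvals : (List.foldl (fun c r => pvStep r c) c0 (pvRows edges (viable_states.length - 1))).values
      = (List.foldl (fun c r => pvStep r c) c0 (pvRows edges (viable_states.length - 1))).items.map (·.2) := rfl
  rw [hvals, hsum, aChar (pvRows edges (viable_states.length - 1)) c0 hc0nd]
  unfold phi
  rw [hc0items, List.map_map]
  congr 1
  apply List.map_congr_left
  intro s _
  simp

theorem length_pvRows (edges : List (List (List Int))) (m : Nat) :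
    (pvRows edges m).length = m := by simp [pvRows]

theorem B_eq (viable_states : List (List Int)) (edges : List (List (List Int)))
    (hvs : viable_states ≠ []) :
    count_valid_paths_py_alt viable_states edges
      = (((PySem.List.pyGet? viable_states 0).getD []).map
          (fun s => waysOf (pvRows edges (viable_states.length - 1)) s)).sum := by
  have hn : 0 < viable_states.length := List.length_pos_iff.2 hvs
  unfold count_valid_paths_py_alt
  by_cases h1 : viable_states.length = 1
  · rw [if_pos h1, h1]
    simp [pvRows, waysOf]
  · rw [if_neg h1]
    have h2 : 2 ≤ viable_states.length := by omega
    -- the backward loop is a foldr over the ascending range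
    have hrev : PySem.List.pyRange ((viable_states.length : Int) - 2) (-1) (-1)
        = (PySem.List.pyRange 0 ((viable_states.length : Int) - 1) 1).reverse := by
      rw [PySem.List.pyRange_neg_one_eq_reverse,
          show ((viable_states.length : Int) - 2) + 1 = (viable_states.length : Int) - 1 from by ring]
      norm_num
    rw [hrev, List.foldl_reverse]
    have hrng : (PySem.List.pyRange 0 ((viable_states.length : Int) - 1) 1).map
          (fun i => (PySem.List.pyGet? edges i).getD [])
        = pvRows edges (viable_states.length - 1) := by
      rw [PySem.List.pyRange_zero, List.map_map,
          show (((viable_states.length : Int) - 1).toNat) = viable_states.length - 1 by omega]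
      unfold pvRows
      apply List.map_congr_left
      intro k _
      rfl
    have hfold := bFold_eq_wlRec edges (PySem.List.pyRange 0 ((viable_states.length : Int) - 1) 1)
    rw [hrng] at hfold
    simp only [hfold]
    cases hr : pvRows edges (viable_states.length - 1) with
    | nil =>
      exfalso
      have := length_pvRows edges (viable_states.length - 1)
      rw [hr] at this
      simp at this
      omega
    | cons r rest =>
      simp only [wlRec, Option.getD_some]
      congr 1
      apply List.map_congr_left
      intro s _
      rw [← lookup_wlRec (r :: rest) s]
      rfl

-- ===== VERDICT (by name: the statement is the Claim_ definition above) =====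
theorem count_valid_paths_py_spec : Claim_equal_count_valid_paths_py := by
  intro viable_states edges _ hpre
  unfold Spec_count_valid_paths_py
  rw [A_eq viable_states edges hpre.1 hpre.2.1, B_eq viable_states edges hpre.1]
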